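-- pv_equiv track=rewrite | github.com/ksh19933/SWjungle | Week2/week2Test/5904.py | dac
-- ===== SOURCE A (Python) =====
-- def dac(k, leng, num):
--   if k == 0:
--     if num == 1:
--       return 'm'
--     else:
--       return 'o'
--   leng = (leng - k - 3) //2
--   k = k - 1
--   if num <= leng:
--     return dac(k, leng, num)
--   elif num == leng+1:
--     return 'm'
--   elif num > leng + k +4:
--     return dac(k, leng, num - leng - k -4)
--   else:
--     return 'o'
-- ===== SOURCE B (Python) =====
-- def dac(k, leng, num):
--     # Iterative descent: at each level peel one recursion layer.  The level-k
--     # string is [child][middle]["reversed child"]; the middle block of length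
--     # k+3 ("m" + "o"*(k+2)) is handled as ONE case.
--     while k != 0:
--         child = (leng - k - 3) // 2
--         mid_end = child + k + 3  # = child + (k-1) + 4
--         if num > mid_end:
--             num -= mid_end
--         elif num > child:
--             return 'm' if num == child + 1 else 'o'
--         leng = child
--         k -= 1
--     return 'm' if num == 1 else 'o'
-- ===== Notes on version B (the rewrite author's own statement) =====
-- stated objective: alternative
-- what changed: Replaces the tail recursion by a while-loop with three mutating state variables and a merged single 'middle block' case (one interval test deciding m/o) instead of A's four-way elif chain; base case moves to the loop exit.
-- outside the precondition, e.g. on dac(-1, 9553, 115): A returns 'm', B does not finish within the time limit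
import Mathlib
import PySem

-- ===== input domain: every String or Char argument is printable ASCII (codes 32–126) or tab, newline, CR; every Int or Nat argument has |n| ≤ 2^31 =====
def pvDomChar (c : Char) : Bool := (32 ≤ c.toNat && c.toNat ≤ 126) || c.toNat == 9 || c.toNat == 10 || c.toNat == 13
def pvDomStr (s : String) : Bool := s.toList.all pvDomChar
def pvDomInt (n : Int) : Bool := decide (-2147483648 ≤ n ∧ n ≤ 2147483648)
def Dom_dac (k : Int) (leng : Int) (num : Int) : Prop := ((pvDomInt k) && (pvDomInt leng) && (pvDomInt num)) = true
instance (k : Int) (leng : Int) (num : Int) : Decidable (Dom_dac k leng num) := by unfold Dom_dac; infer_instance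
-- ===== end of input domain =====

-- B replaces A's tail recursion by a while-loop whose middle "m"+"o"* block is
-- one merged interval case (objective: alternative decomposition, same cost).

-- ===== PORT A =====
-- A's recursion decreases k by exactly 1 per call, so fuel k.toNat is exact on
-- the precondition 0 ≤ k; the fuel-exhausted "" is unreachable there.
def dacGoA : Nat → Int → Int → Int → String
  | 0, k, _, num =>
    if k = 0 then (if num = 1 then "m" else "o") else ""
  | fuel+1, k, leng, num =>
    if k = 0 then (if num = 1 then "m" else "o")
    else
      let leng' := PySem.Int.floordiv (leng - k - 3) 2
      let k' := k - 1
      if num ≤ leng' then dacGoA fuel k' leng' num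
      else if num = leng' + 1 then "m"
      else if num > leng' + k' + 4 then dacGoA fuel k' leng' (num - leng' - k' - 4)
      else "o"

def dac (k : Int) (leng : Int) (num : Int) : String := dacGoA k.toNat k leng num

-- ===== PORT B =====
-- transliteration of Source B's `while k != 0` loop (state k, leng, num), fuelled
-- the same way; "" is the unreachable fuel-exhausted value.
def dacLoopB : Nat → Int → Int → Int → String
  | 0, k, _, num =>
    if k ≠ 0 then "" else (if num = 1 then "m" else "o")
  | fuel+1, k, leng, num =>
    if k ≠ 0 then
      let child := PySem.Int.floordiv (leng - k - 3) 2
      let midEnd := child + k + 3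
      if num > midEnd then dacLoopB fuel (k - 1) child (num - midEnd)
      else if num > child then (if num = child + 1 then "m" else "o")
      else dacLoopB fuel (k - 1) child num
    else (if num = 1 then "m" else "o")

def dac_alt (k : Int) (leng : Int) (num : Int) : String := dacLoopB k.toNat k leng num

-- ===== PRECONDITION & SPEC =====
-- Pre_ excludes k < 0: there Python A usually recurses forever (RecursionError), and on the few
-- negative-k inputs where A's descent happens to bottom out with a value, B's loop diverges.
def Pre_dac (k : Int) (leng : Int) (num : Int) : Prop := 0 ≤ k
instance (k : Int) (leng : Int) (num : Int) : Decidable (Pre_dac k leng num) := by unfold Pre_dac; infer_instance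
def pvWitness_dac : Int × Int × Int := (2, 9, 5)
def Spec_dac (k : Int) (leng : Int) (num : Int) (out : String) : Prop := out = dac_alt k leng num
instance (k : Int) (leng : Int) (num : Int) (out : String) : Decidable (Spec_dac k leng num out) := by unfold Spec_dac; infer_instance

-- ===== CLAIM (what is proved, stated in full; the proofs are below) =====
def Claim_equal_dac : Prop := ∀ (k : Int) (leng : Int) (num : Int), Dom_dac k leng num → Pre_dac k leng num → Spec_dac k leng num (dac k leng num)

-- ===== LEMMAS AND PROOFS =====
theorem go_eq : ∀ (fuel : Nat) (k leng num : Int), 0 ≤ k →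
    dacGoA fuel k leng num = dacLoopB fuel k leng num := by
  intro fuel
  induction fuel with
  | zero =>
    intro k leng num _
    simp only [dacGoA, dacLoopB, ne_eq, ite_not]
  | succ f ih =>
    intro k leng num hk
    by_cases hk0 : k = 0
    · subst hk0; simp [dacGoA, dacLoopB]
    · have hk1 : 1 ≤ k := lt_of_le_of_ne hk (Ne.symm hk0)
      simp only [dacGoA, dacLoopB, hk0, if_neg, ne_eq, not_false_iff, if_pos]
      set L := PySem.Int.floordiv (leng - k - 3) 2 with hL
      have hM : L + k + 3 = L + (k - 1) + 4 := by ring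
      split_ifs with h1 h2 h3 h4 h5 h6 h7 <;>
        first
        | (apply ih; omega)
        | rfl
        | omega
        | (rw [show num - (L + k + 3) = num - L - (k - 1) - 4 by ring]; apply ih; omega)
  
-- ===== VERDICT (by name: the statement is the Claim_ definition above) =====
theorem dac_spec : Claim_equal_dac := by
  intro k leng num _ hpre
  unfold Spec_dac dac dac_alt
  exact go_eq _ _ _ _ hpre
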